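-- pv_equiv track=rewrite | github.com/jeremyzanella0/2025-2026 | pscoding11.py | parse_player_def
-- ===== SOURCE A (Python) =====
-- def parse_player_def(token: str):
--     """
--     Parse a token into ball handler, defender, action type, screener/recipient, screener_def, and after-action codes.
--     Supports PNR, PNP, SLP, GST, RJ, DHO, HO, slash actions, and numeric tokens.
--     Returns: (ball_handler, ball_def, action_type, screener, screener_def, action_codes)
--     """
--     action_type = None
--     for key in ("pnr","pnp","slp","gst","rj","dho","ho"):
--         if key in token:
--             action_type = key
--             break
--
--     if action_type:
--         ball_part, rest = token.split(action_type,1)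
--         if "/" in ball_part:
--             ball_handler, def_and_actions = ball_part.split("/",1)
--             i = 0
--             while i < len(def_and_actions) and (def_and_actions[i].isdigit() or def_and_actions[i:i+3]=="rot"):
--                 if def_and_actions[i:i+3]=="rot":
--                     i+=3
--                     while i<len(def_and_actions) and def_and_actions[i].isdigit():
--                         i+=1
--                     break
--                 i+=1
--             ball_def = def_and_actions[:i] if i>0 else None
--             action_codes = def_and_actions[i:]+rest
--         else:
--             ball_handler, ball_def, action_codes = ball_part, None, rest
--
--         # Screener / recipient + defender
--         screener, screener_def, action = None, None, ""
--         if "/" in action_codes: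
--             j = 0
--             while j < len(action_codes) and (action_codes[j].isdigit() or action_codes[j:j+3]=="rot"):
--                 if action_codes[j:j+3]=="rot":
--                     j+=3
--                     while j<len(action_codes) and action_codes[j].isdigit():
--                         j+=1
--                     break
--                 j+=1
--             screener = action_codes[:j]
--             rest2 = action_codes[j:]
--             if rest2.startswith("/"):
--                 k=1
--                 if rest2[1:4]=="rot":
--                     k=4
--                     while k<len(rest2) and rest2[k].isdigit():
--                         k+=1
--                 else:
--                     while k<len(rest2) and rest2[k].isdigit():
--                         k+=1
--                 screener_def = rest2[1:k]
--                 action = rest2[k:]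
--             else:
--                 action=rest2
--         else:
--             i=0
--             while i<len(action_codes) and (action_codes[i].isdigit() or action_codes[i:i+3]=="rot"):
--                 if action_codes[i:i+3]=="rot":
--                     i+=3
--                     while i<len(action_codes) and action_codes[i].isdigit():
--                         i+=1
--                     break
--                 i+=1
--             screener=action_codes[:i]
--             action=action_codes[i:]
--         return ball_handler, ball_def, action_type, screener, screener_def, action
--
--     # Slash / normal actions
--     if "/" in token:
--         off, rest = token.split("/",1)
--         i=0
--         if rest.startswith("rot"):
--             i=3
--             while i<len(rest) and rest[i].isdigit():
--                 i+=1
--         else: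
--             while i<len(rest) and rest[i].isdigit():
--                 i+=1
--         def_player = rest[:i] if i>0 else None
--         action = rest[i:] if i<len(rest) else ""
--         return off, def_player, action, None, None, None
--
--     return token, None, token, None, None, None
-- ===== SOURCE B (Python) =====
-- # B: position-based recursive matchers (end indices into the string) instead of A's
-- # index-advancing while loops with breaks; find()-based slicing instead of split();
-- # A's two screener branches are merged into one unconditional path.
--
-- def _digits(s, i):
--     """End of the run of ASCII digits starting at position i (recursive)."""
--     return _digits(s, i + 1) if i < len(s) and s[i].isdigit() else i
--
-- def _rotdigits(s, i):
--     """End of 'rot' + digits starting at i, or None if 'rot' is not at i."""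
--     return _digits(s, i + 3) if s.startswith("rot", i) else None
--
-- def _codes(s, i):
--     """End of digits optionally followed by 'rot' + digits (defender-code prefix)."""
--     j = _digits(s, i)
--     k = _rotdigits(s, j)
--     return j if k is None else k
--
-- def _defcode(s, i):
--     """End of ('rot' + digits) if 'rot' is at i, else end of digits."""
--     k = _rotdigits(s, i)
--     return _digits(s, i) if k is None else k
--
-- def _keyed(token, key, p):
--     head, rest = token[:p], token[p + len(key):]
--     s = head.find("/")
--     if s >= 0:
--         dna = head[s + 1:]
--         i = _codes(dna, 0)
--         ball_handler, ball_def = head[:s], dna[:i] or None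
--         action_codes = dna[i:] + rest
--     else:
--         ball_handler, ball_def, action_codes = head, None, rest
--     j = _codes(action_codes, 0)
--     screener, rest2 = action_codes[:j], action_codes[j:]
--     if rest2.startswith("/"):
--         k = _defcode(rest2, 1)
--         return ball_handler, ball_def, key, screener, rest2[1:k], rest2[k:]
--     return ball_handler, ball_def, key, screener, None, rest2
--
-- def parse_player_def(token: str):
--     for key in ("pnr", "pnp", "slp", "gst", "rj", "dho", "ho"):
--         p = token.find(key)
--         if p >= 0:
--             return _keyed(token, key, p)
--     s = token.find("/")
--     if s < 0:
--         return token, None, token, None, None, None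
--     rest = token[s + 1:]
--     i = _defcode(rest, 0)
--     return token[:s], rest[:i] or None, rest[i:], None, None, None
-- ===== Notes on version B (the rewrite author's own statement) =====
-- stated objective: simpler
-- what changed: B parses via small recursive end-of-match functions on string positions (_digits/_rotdigits/_codes/_defcode returning end indices) instead of A's stateful while loops with breaks, slices with find() instead of split(), and merges A's duplicated screener branches ('/' in codes vs not) into one unconditional path.
import Mathlib
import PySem

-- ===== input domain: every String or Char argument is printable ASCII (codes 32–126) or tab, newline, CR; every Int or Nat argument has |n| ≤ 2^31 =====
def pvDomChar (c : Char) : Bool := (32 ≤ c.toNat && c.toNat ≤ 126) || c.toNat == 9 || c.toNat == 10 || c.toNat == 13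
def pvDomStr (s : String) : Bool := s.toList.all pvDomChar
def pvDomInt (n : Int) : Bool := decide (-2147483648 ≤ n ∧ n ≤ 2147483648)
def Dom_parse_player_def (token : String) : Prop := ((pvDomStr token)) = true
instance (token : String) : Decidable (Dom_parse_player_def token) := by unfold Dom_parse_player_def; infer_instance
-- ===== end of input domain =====

-- B replaces A's index-advancing while loops (with breaks) by recursive end-of-match functions on
-- positions, uses find()-based slicing instead of split(), and merges A's two screener branches: simpler.

-- ===== PORT A =====

-- inner `while i < len(s) and s[i].isdigit(): i += 1` loops, as recursion over the suffix
def pvDigitsRunA : List Char → Nat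
  | [] => 0
  | c :: r => if PySem.Chars.strIsdigit [c] then pvDigitsRunA r + 1 else 0

-- the `while i < len(s) and (s[i].isdigit() or s[i:i+3] == "rot"): …` loop (ball_def / screener scans)
def pvScanA : List Char → Nat
  | [] => 0
  | c :: r =>
    if PySem.Chars.strIsdigit [c] || (c :: r).take 3 == ['r', 'o', 't'] then
      if (c :: r).take 3 == ['r', 'o', 't'] then 3 + pvDigitsRunA (r.drop 2)
      else pvScanA r + 1
    else 0

-- s.split(sep, 1) at the first occurrence (call sites guard that sep occurs; otherwise (s, []))
def pvSplit1A (s sep : List Char) : List Char × List Char :=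
  let i := PySem.Chars.find s sep
  if i < 0 then (s, []) else (s.take i.toNat, s.drop (i.toNat + sep.length))

-- the `for key in (…): if key in token: action_type = key; break` loop
def pvFindKeyA : List (List Char) → List Char → Option (List Char)
  | [], _ => none
  | k :: ks, cs => if PySem.Chars.isIn k cs then some k else pvFindKeyA ks cs

def parse_player_def (token : String) :
    Option String × Option String × Option String × Option String × Option String × Option String :=
  let cs := token.toList
  match pvFindKeyA [['p','n','r'], ['p','n','p'], ['s','l','p'], ['g','s','t'], ['r','j'], ['d','h','o'], ['h','o']] cs with
  | some key =>
    let bp := pvSplit1A cs key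
    let ballPart := bp.1
    let rest := bp.2
    let t1 :=
      if PySem.Chars.isIn ['/'] ballPart then
        let hd := pvSplit1A ballPart ['/']
        let dna := hd.2
        let i := pvScanA dna
        (hd.1, if i > 0 then some (dna.take i) else none, dna.drop i ++ rest)
      else (ballPart, none, rest)
    let action_codes := t1.2.2
    let t2 :=
      if PySem.Chars.isIn ['/'] action_codes then
        let j := pvScanA action_codes
        let screener := action_codes.take j
        let rest2 := action_codes.drop j
        if PySem.Chars.startswith rest2 ['/'] then
          let k := if (rest2.drop 1).take 3 == ['r','o','t']
                   then 4 + pvDigitsRunA (rest2.drop 4)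
                   else 1 + pvDigitsRunA (rest2.drop 1)
          (some screener, some ((rest2.drop 1).take (k - 1)), rest2.drop k)
        else (some screener, none, rest2)
      else
        let i := pvScanA action_codes
        (some (action_codes.take i), none, action_codes.drop i)
    (some (String.ofList t1.1), t1.2.1.map String.ofList, some (String.ofList key),
     t2.1.map String.ofList, t2.2.1.map String.ofList, some (String.ofList t2.2.2))
  | none =>
    if PySem.Chars.isIn ['/'] cs then
      let sp := pvSplit1A cs ['/']
      let off := sp.1
      let rest := sp.2
      let i := if PySem.Chars.startswith rest ['r','o','t']
               then 3 + pvDigitsRunA (rest.drop 3)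
               else pvDigitsRunA rest
      (some (String.ofList off),
       if i > 0 then some (String.ofList (rest.take i)) else none,
       some (String.ofList (if i < rest.length then rest.drop i else [])),
       none, none, none)
    else (some token, none, some token, none, none, none)

-- ===== PORT B =====

-- _digits(s, i): end of the run of digits starting at position i (recursive)
def pvDigitsEndB (s : List Char) (i : Nat) : Nat :=
  if h : i < s.length ∧ PySem.Chars.strIsdigit [s.getD i ' '] = true then pvDigitsEndB s (i + 1) else i
termination_by s.length - i
decreasing_by omega

-- _rotdigits(s, i): end of 'rot'+digits starting at i, or none (s.startswith("rot", i) = startswith on drop i)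
def pvRotDigitsB (s : List Char) (i : Nat) : Option Nat :=
  if PySem.Chars.startswith (s.drop i) ['r','o','t'] then some (pvDigitsEndB s (i + 3)) else none

-- _codes(s, i)
def pvCodesB (s : List Char) (i : Nat) : Nat :=
  let j := pvDigitsEndB s i
  match pvRotDigitsB s j with
  | none => j
  | some k => k

-- _defcode(s, i)
def pvDefcodeB (s : List Char) (i : Nat) : Nat :=
  match pvRotDigitsB s i with
  | none => pvDigitsEndB s i
  | some k => k

-- _keyed(token, key, p)
def pvKeyedB (cs key : List Char) (p : Int) :
    Option String × Option String × Option String × Option String × Option String × Option String :=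
  let head := cs.take p.toNat
  let rest := cs.drop (p.toNat + key.length)
  let s := PySem.Chars.find head ['/']
  let t :=
    if s ≥ 0 then
      let dna := head.drop (s.toNat + 1)
      let i := pvCodesB dna 0
      (head.take s.toNat,
       if (dna.take i).isEmpty then none else some (dna.take i),
       dna.drop i ++ rest)
    else (head, (none : Option (List Char)), rest)
  let j := pvCodesB t.2.2 0
  let screener := t.2.2.take j
  let rest2 := t.2.2.drop j
  if PySem.Chars.startswith rest2 ['/'] then
    let k := pvDefcodeB rest2 1
    (some (String.ofList t.1), t.2.1.map String.ofList, some (String.ofList key),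
     some (String.ofList screener), some (String.ofList ((rest2.drop 1).take (k - 1))),
     some (String.ofList (rest2.drop k)))
  else
    (some (String.ofList t.1), t.2.1.map String.ofList, some (String.ofList key),
     some (String.ofList screener), none, some (String.ofList rest2))

-- the `for key in (…): p = token.find(key); if p >= 0: return _keyed(…)` loop
def pvKeyLoopB (cs : List Char) :
    List (List Char) →
    Option (Option String × Option String × Option String × Option String × Option String × Option String)
  | [] => none
  | key :: ks =>
    let p := PySem.Chars.find cs key
    if p ≥ 0 then some (pvKeyedB cs key p) else pvKeyLoopB cs ks

def parse_player_def_alt (token : String) :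
    Option String × Option String × Option String × Option String × Option String × Option String :=
  let cs := token.toList
  match pvKeyLoopB cs [['p','n','r'], ['p','n','p'], ['s','l','p'], ['g','s','t'], ['r','j'], ['d','h','o'], ['h','o']] with
  | some r => r
  | none =>
    let s := PySem.Chars.find cs ['/']
    if s < 0 then (some token, none, some token, none, none, none)
    else
      let rest := cs.drop (s.toNat + 1)
      let i := pvDefcodeB rest 0
      (some (String.ofList (cs.take s.toNat)),
       if (rest.take i).isEmpty then none else some (String.ofList (rest.take i)),
       some (String.ofList (rest.drop i)), none, none, none)

-- ===== PRECONDITION & SPEC =====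
def Spec_parse_player_def (token : String) (out : Option String × Option String × Option String × Option String × Option String × Option String) : Prop := out = parse_player_def_alt token
instance (token : String) (out : Option String × Option String × Option String × Option String × Option String × Option String) : Decidable (Spec_parse_player_def token out) := by unfold Spec_parse_player_def; infer_instance

-- ===== CLAIM (what is proved, stated in full; the proofs are below) =====
def Claim_equal_parse_player_def : Prop := ∀ (token : String), Dom_parse_player_def token → Spec_parse_player_def token (parse_player_def token)

-- ===== LEMMAS AND PROOFS =====

theorem pv_digitsEnd_eq (s : List Char) (i : Nat) :
    pvDigitsEndB s i = i + pvDigitsRunA (s.drop i) := by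
  rw [pvDigitsEndB]
  split_ifs with h
  · obtain ⟨hlt, hd⟩ := h
    rw [List.getD_eq_getElem s ' ' hlt] at hd
    rw [pv_digitsEnd_eq s (i + 1), List.drop_eq_getElem_cons hlt]
    simp only [pvDigitsRunA]
    rw [if_pos hd]
    omega
  · rcases Nat.lt_or_ge i s.length with hlt | hge
    · have hd : ¬ PySem.Chars.strIsdigit [s[i]] = true := fun hc =>
        h ⟨hlt, by rw [List.getD_eq_getElem s ' ' hlt]; exact hc⟩
      rw [List.drop_eq_getElem_cons hlt]
      simp only [pvDigitsRunA]
      rw [if_neg hd]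
      omega
    · rw [List.drop_eq_nil_of_le hge]
      simp [pvDigitsRunA]
termination_by s.length - i

theorem pv_startswith_rot (l : List Char) :
    PySem.Chars.startswith l ['r','o','t'] = (l.take 3 == ['r','o','t']) := by
  rw [Bool.eq_iff_iff, PySem.Chars.startswith_iff, beq_iff_eq]
  constructor
  · intro h
    have := List.prefix_iff_eq_take.mp h
    simpa using this.symm
  · intro h
    exact List.prefix_iff_eq_take.mpr (by simpa using h.symm)

theorem pv_scanA_char (s : List Char) :
    pvScanA s =
      (if (s.drop (pvDigitsRunA s)).take 3 == ['r','o','t']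
       then pvDigitsRunA s + 3 + pvDigitsRunA (s.drop (pvDigitsRunA s + 3))
       else pvDigitsRunA s) := by
  induction s with
  | nil => rfl
  | cons c r ih =>
    by_cases hd : PySem.Chars.strIsdigit [c] = true
    · have hrot : ((c :: r).take 3 == ['r','o','t']) = false := by
        apply beq_eq_false_iff_ne.mpr
        intro he
        have hcr : c = 'r' := by
          rcases r with _ | ⟨c2, r2⟩ <;> simp [List.take] at he <;> tauto
        subst hcr; exact absurd hd (by decide)
      have hD : pvDigitsRunA (c :: r) = pvDigitsRunA r + 1 := by
        simp [pvDigitsRunA, hd]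
      simp only [pvScanA, hd, hrot, Bool.true_or, if_true, Bool.false_eq_true, if_false]
      rw [ih, hD]
      have hdrop1 : (c :: r).drop (pvDigitsRunA r + 1) = r.drop (pvDigitsRunA r) :=
        List.drop_succ_cons
      have hdrop4 : (c :: r).drop (pvDigitsRunA r + 1 + 3) = r.drop (pvDigitsRunA r + 3) := by
        have h4 : pvDigitsRunA r + 1 + 3 = (pvDigitsRunA r + 3) + 1 := by omega
        rw [h4]; exact List.drop_succ_cons
      rw [hdrop1, hdrop4]
      split_ifs <;> omega
    · have hD0 : pvDigitsRunA (c :: r) = 0 := by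
        simp only [Bool.not_eq_true] at hd
        simp [pvDigitsRunA, hd]
      by_cases hrot : ((c :: r).take 3 == ['r','o','t']) = true
      · simp only [pvScanA, hD0, List.drop_zero, hrot, hd, Bool.or_true, if_true]
        have h3 : List.drop (0 + 3) (c :: r) = r.drop 2 := rfl
        rw [h3]
      · have hrot' : ((c :: r).take 3 == ['r','o','t']) = false := by simpa using hrot
        simp only [pvScanA, hD0, List.drop_zero, hrot', hd, Bool.or_false,
          Bool.false_eq_true, if_false]

theorem pv_codesB_eq (s : List Char) : pvCodesB s 0 = pvScanA s := by
  rw [pv_scanA_char]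
  by_cases h : (List.take 3 (s.drop (pvDigitsRunA s)) == ['r','o','t']) = true
  · simp only [pvCodesB, pvRotDigitsB, pv_digitsEnd_eq, List.drop_zero, Nat.zero_add,
      pv_startswith_rot, h, if_true]
  · have h' : (List.take 3 (s.drop (pvDigitsRunA s)) == ['r','o','t']) = false := by
      simpa using h
    simp only [pvCodesB, pvRotDigitsB, pv_digitsEnd_eq, List.drop_zero, Nat.zero_add,
      pv_startswith_rot, h', Bool.false_eq_true, if_false]

theorem pv_defcodeB_zero (s : List Char) :
    pvDefcodeB s 0 =
      (if PySem.Chars.startswith s ['r','o','t'] then 3 + pvDigitsRunA (s.drop 3)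
       else pvDigitsRunA s) := by
  by_cases h : PySem.Chars.startswith s ['r','o','t'] = true
  · simp only [pvDefcodeB, pvRotDigitsB, List.drop_zero, pv_digitsEnd_eq, h, if_true]
  · have h' : PySem.Chars.startswith s ['r','o','t'] = false := by simpa using h
    simp only [pvDefcodeB, pvRotDigitsB, List.drop_zero, pv_digitsEnd_eq, h',
      Bool.false_eq_true, if_false]
    omega

theorem pv_defcodeB_one (s : List Char) :
    pvDefcodeB s 1 =
      (if (s.drop 1).take 3 == ['r','o','t'] then 4 + pvDigitsRunA (s.drop 4)
       else 1 + pvDigitsRunA (s.drop 1)) := by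
  by_cases h : ((s.drop 1).take 3 == ['r','o','t']) = true
  · simp only [pvDefcodeB, pvRotDigitsB, pv_digitsEnd_eq, pv_startswith_rot, h, if_true]
  · have h' : ((s.drop 1).take 3 == ['r','o','t']) = false := by simpa using h
    simp only [pvDefcodeB, pvRotDigitsB, pv_digitsEnd_eq, pv_startswith_rot, h',
      Bool.false_eq_true, if_false]

theorem pv_isIn_iff_find (k cs : List Char) :
    PySem.Chars.isIn k cs = true ↔ PySem.Chars.find cs k ≥ 0 := by
  rw [PySem.Chars.isIn_iff_infix, ← PySem.Chars.find_nonneg_iff]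

theorem pv_keyLoop_eq (cs : List Char) (ks : List (List Char)) :
    pvKeyLoopB cs ks = (pvFindKeyA ks cs).map (fun k => pvKeyedB cs k (PySem.Chars.find cs k)) := by
  induction ks with
  | nil => rfl
  | cons k ks ih =>
    by_cases h : PySem.Chars.isIn k cs = true
    · have hf : PySem.Chars.find cs k ≥ 0 := (pv_isIn_iff_find k cs).mp h
      simp [pvKeyLoopB, pvFindKeyA, h, hf]
    · have hf : ¬ PySem.Chars.find cs k ≥ 0 := fun hc => h ((pv_isIn_iff_find k cs).mpr hc)
      simp only [pvKeyLoopB, pvFindKeyA, h, hf, Bool.false_eq_true, if_false, ih]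

theorem pv_findKey_mem (ks : List (List Char)) (cs k : List Char)
    (h : pvFindKeyA ks cs = some k) : PySem.Chars.isIn k cs = true := by
  induction ks with
  | nil => simp [pvFindKeyA] at h
  | cons k0 ks ih =>
    by_cases h0 : PySem.Chars.isIn k0 cs = true
    · simp only [pvFindKeyA, h0, if_true, Option.some.injEq] at h
      exact h ▸ h0
    · simp only [pvFindKeyA, h0, Bool.false_eq_true, if_false] at h
      exact ih h

theorem pv_no_slash (l : List Char) (j : Nat) (h : PySem.Chars.isIn ['/'] l = false) :
    PySem.Chars.startswith (l.drop j) ['/'] = false := by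
  rw [← Bool.not_eq_true, PySem.Chars.startswith_iff]
  intro hp
  have : ['/'] <:+: l := hp.isInfix.trans (List.drop_suffix j l).isInfix
  rw [PySem.Chars.isIn_eq_false_iff] at h
  exact h this

theorem pv_take_isEmpty (rest : List Char) (n : Nat) (hn : rest = [] → n = 0) :
    (rest.take n).isEmpty = decide (n = 0) := by
  by_cases h : n = 0
  · simp [h]
  · have hne : rest ≠ [] := fun he => h (hn he)
    simp [List.take_eq_nil_iff, h, hne]

-- `if n < l.length then l.drop n else []` = l.drop n
theorem pv_drop_ite (l : List Char) (n : Nat) :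
    (if n < l.length then l.drop n else []) = l.drop n := by
  split_ifs with h
  · rfl
  · rw [List.drop_eq_nil_of_le]; omega

set_option maxHeartbeats 1000000 in
theorem parse_player_def_eq (token : String) :
    parse_player_def token = parse_player_def_alt token := by
  unfold parse_player_def parse_player_def_alt
  simp only [pv_keyLoop_eq]
  cases hk : pvFindKeyA [['p','n','r'], ['p','n','p'], ['s','l','p'], ['g','s','t'], ['r','j'], ['d','h','o'], ['h','o']] token.toList with
  | none =>
    simp only [Option.map_none]
    by_cases hin : PySem.Chars.isIn ['/'] token.toList = true
    · have hf : PySem.Chars.find token.toList ['/'] ≥ 0 := (pv_isIn_iff_find _ _).mp hin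
      have hnlt : ¬ PySem.Chars.find token.toList ['/'] < 0 := by omega
      simp only [hin, if_true, hnlt, if_false, pvSplit1A, List.length_cons, List.length_nil,
        Nat.zero_add]
      generalize token.toList.drop ((PySem.Chars.find token.toList ['/']).toNat + 1) = rest
      rw [pv_defcodeB_zero]
      set e := (if PySem.Chars.startswith rest ['r','o','t'] = true then 3 + pvDigitsRunA (rest.drop 3)
                else pvDigitsRunA rest) with he
      have hn : rest = [] → e = 0 := by
        intro hnil; rw [he, hnil]; rfl
      rw [pv_take_isEmpty rest e hn, pv_drop_ite rest e]
      by_cases hz : e = 0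
      · simp [hz]
      · simp [hz, Nat.pos_of_ne_zero hz]
    · have hin' : PySem.Chars.isIn ['/'] token.toList = false := by simpa using hin
      have hf : PySem.Chars.find token.toList ['/'] < 0 := by
        have h1 : PySem.Chars.find token.toList ['/'] = -1 := by
          rw [PySem.Chars.find_eq_neg_one_iff]
          rw [PySem.Chars.isIn_eq_false_iff] at hin'
          exact hin'
        omega
      simp [hin', hf]
  | some key =>
    have hfound : PySem.Chars.isIn key token.toList = true := pv_findKey_mem _ _ _ hk
    have hfk : PySem.Chars.find token.toList key ≥ 0 := (pv_isIn_iff_find _ _).mp hfound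
    have hnlt : ¬ PySem.Chars.find token.toList key < 0 := by omega
    simp only [Option.map_some, pvKeyedB, pvSplit1A, hnlt, if_false]
    generalize token.toList.take (PySem.Chars.find token.toList key).toNat = head
    generalize token.toList.drop ((PySem.Chars.find token.toList key).toNat + key.length) = rest
    by_cases hb : PySem.Chars.isIn ['/'] head = true
    · have hfb : PySem.Chars.find head ['/'] ≥ 0 := (pv_isIn_iff_find _ _).mp hb
      have hnb : ¬ PySem.Chars.find head ['/'] < 0 := by omega
      simp only [hb, if_true, hfb, hnb, if_false, List.length_cons, List.length_nil,
        Nat.zero_add, pv_codesB_eq, pv_defcodeB_one]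
      generalize head.drop ((PySem.Chars.find head ['/']).toNat + 1) = dna
      set i := pvScanA dna with hi
      have hdnil : dna = [] → i = 0 := by
        intro h; rw [hi, h]; rfl
      rw [pv_take_isEmpty dna i hdnil]
      set ac := dna.drop i ++ rest with hac
      set j := pvScanA ac with hj
      set rest2 := ac.drop j with hrest2
      by_cases hs : PySem.Chars.isIn ['/'] ac = true
      · simp only [hs, if_true]
        by_cases hz : i = 0
        · simp only [hz, decide_true, if_true, gt_iff_lt, lt_self_iff_false, if_false]
          split_ifs <;> simp
        · have hpos := Nat.pos_of_ne_zero hz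
          simp only [hz, decide_false, Bool.false_eq_true, if_false, gt_iff_lt, hpos, if_true]
          split_ifs <;> simp
      · have hs' : PySem.Chars.isIn ['/'] ac = false := by simpa using hs
        have hsw := pv_no_slash ac j hs'
        rw [← hrest2] at hsw
        rw [hsw]
        simp only [hs', Bool.false_eq_true, if_false]
        by_cases hz : i = 0
        · simp [hz]
        · simp [hz, Nat.pos_of_ne_zero hz]
    · have hb' : PySem.Chars.isIn ['/'] head = false := by simpa using hb
      have hfb : PySem.Chars.find head ['/'] = -1 := by
        rw [PySem.Chars.find_eq_neg_one_iff]
        rw [PySem.Chars.isIn_eq_false_iff] at hb'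
        exact hb'
      have hnb : ¬ PySem.Chars.find head ['/'] ≥ 0 := by omega
      simp only [hb', Bool.false_eq_true, if_false, hnb, pv_codesB_eq, pv_defcodeB_one]
      set j := pvScanA rest with hj
      by_cases hs : PySem.Chars.isIn ['/'] rest = true
      · simp only [hs, if_true]
        split_ifs <;> simp
      · have hs' : PySem.Chars.isIn ['/'] rest = false := by simpa using hs
        have hsw := pv_no_slash rest j hs'
        rw [hsw]
        simp [hs']

-- ===== VERDICT (by name: the statement is the Claim_ definition above) =====
theorem parse_player_def_spec : Claim_equal_parse_player_def := by
  intro token _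
  unfold Spec_parse_player_def
  exact parse_player_def_eq token
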